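-- pv_equiv track=rewrite | github.com/ByteCraft-Co/MIDORI | src/midori_cli/terminal.py | _brace_delta
-- ===== SOURCE A (Python) =====
-- def _brace_delta(line: str) -> int:
--     depth = 0
--     in_string = False
--     escaped = False
--     for ch in line:
--         if in_string:
--             if escaped:
--                 escaped = False
--                 continue
--             if ch == "\\":
--                 escaped = True
--                 continue
--             if ch == '"':
--                 in_string = False
--             continue
--
--         if ch == '"':
--             in_string = True
--             continue
--         if ch == "{":
--             depth += 1
--         elif ch == "}":
--             depth -= 1
--     return depth
-- ===== SOURCE B (Python) =====
-- def _brace_delta(line: str) -> int: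
--     # Two-phase: first strip out double-quoted string literals (honouring
--     # backslash escapes; an unterminated string runs to end of line), then
--     # count braces in what remains.
--     out = []
--     i = 0
--     n = len(line)
--     while i < n:
--         ch = line[i]
--         if ch == '"':
--             i += 1
--             while i < n:
--                 c = line[i]
--                 if c == '\\':
--                     i += 2
--                 elif c == '"':
--                     i += 1
--                     break
--                 else:
--                     i += 1
--         else:
--             out.append(ch)
--             i += 1
--     return out.count('{') - out.count('}')
-- ===== Notes on version B (the rewrite author's own statement) =====
-- stated objective: alternative
-- what changed: Replaced the single fused char-by-char state machine (depth/in_string/escaped flags) with a two-phase approach: first strip out double-quoted string literals via an index scan with an inner skip loop, then count opening and closing braces in the remainder with list.count.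
import Mathlib
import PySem

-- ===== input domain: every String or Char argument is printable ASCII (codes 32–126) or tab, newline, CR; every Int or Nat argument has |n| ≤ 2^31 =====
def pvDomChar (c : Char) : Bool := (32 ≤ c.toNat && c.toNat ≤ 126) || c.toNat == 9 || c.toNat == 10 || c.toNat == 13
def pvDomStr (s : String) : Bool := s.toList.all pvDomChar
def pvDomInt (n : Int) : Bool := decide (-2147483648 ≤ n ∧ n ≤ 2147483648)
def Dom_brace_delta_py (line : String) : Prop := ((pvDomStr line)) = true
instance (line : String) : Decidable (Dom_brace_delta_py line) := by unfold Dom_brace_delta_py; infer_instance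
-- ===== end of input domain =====

-- B strips double-quoted string literals first and then counts braces in the
-- remainder (two-phase), instead of A's single fused pass with boolean flags;
-- objective: alternative decomposition, same cost.

-- ===== PORT A =====
-- A: one stateful pass with (depth, in_string, escaped).
def braceStepA (st : Int × Bool × Bool) (ch : Char) : Int × Bool × Bool :=
  let (depth, in_string, escaped) := st
  if in_string then
    if escaped then (depth, in_string, false)
    else if ch = '\\' then (depth, in_string, true)
    else if ch = '"' then (depth, false, escaped)
    else (depth, in_string, escaped)
  else
    if ch = '"' then (depth, true, escaped)
    else if ch = '{' then (depth + 1, in_string, escaped)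
    else if ch = '}' then (depth - 1, in_string, escaped)
    else (depth, in_string, escaped)

def brace_delta_py (line : String) : Int :=
  (line.toList.foldl braceStepA (0, false, false)).1

-- ===== PORT B =====
-- B: strip quoted string literals first, then count braces in the remainder.
-- skipStr consumes the rest of a string literal (Source B's inner while loop).
def skipStr : List Char → List Char
  | [] => []
  | c :: rest =>
    if c = '\\' then skipStr rest.tail
    else if c = '"' then rest
    else skipStr rest
termination_by l => l.length
decreasing_by all_goals (simp [List.length_tail]; try omega)

theorem skipStr_length_le : ∀ l : List Char, (skipStr l).length ≤ l.length := by
  intro l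
  induction l using skipStr.induct
  case case1 => simp [skipStr]
  case case2 rest ih =>
      simp only [skipStr]
      exact Nat.le_trans ih (by simp [List.length_tail]; omega)
  case case3 rest h => simp [skipStr, h]
  case case4 c rest h1 h2 ih =>
      simp only [skipStr, if_neg h1, if_neg h2]
      exact Nat.le_trans ih (by simp)

-- stripChars is Source B's outer while loop building `out`.
def stripChars : List Char → List Char
  | [] => []
  | c :: rest =>
    if c = '"' then stripChars (skipStr rest)
    else c :: stripChars rest
termination_by l => l.length
decreasing_by
  · exact Nat.lt_succ_of_le (skipStr_length_le rest)
  · simp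

def brace_delta_py_alt (line : String) : Int :=
  let out := stripChars line.toList
  (PySem.List.count out '{') - (PySem.List.count out '}')

-- ===== PRECONDITION & SPEC =====
def Spec_brace_delta_py (line : String) (out : Int) : Prop := out = brace_delta_py_alt line
instance (line : String) (out : Int) : Decidable (Spec_brace_delta_py line out) := by unfold Spec_brace_delta_py; infer_instance

-- ===== CLAIM (what is proved, stated in full; the proofs are below) =====
def Claim_equal_brace_delta_py : Prop := ∀ (line : String), Dom_brace_delta_py line → Spec_brace_delta_py line (brace_delta_py line)

-- ===== LEMMAS AND PROOFS =====

-- braces outside strings, as an Int, of a stripped character list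
def braceCnt (xs : List Char) : Int := (xs.count '{' : Int) - (xs.count '}' : Int)

-- folding A's step from the in-string state equals folding from the plain
-- state on the remainder after the string literal ends
theorem foldA_in_string : ∀ (l : List Char) (d : Int),
    (l.foldl braceStepA (d, true, false)).1
      = ((skipStr l).foldl braceStepA (d, false, false)).1 := by
  intro l
  induction l using skipStr.induct
  case case1 => intro d; simp [skipStr]
  case case2 rest ih =>
      intro d
      have hesc : (rest.foldl braceStepA (d, true, true)).1
          = (rest.tail.foldl braceStepA (d, true, false)).1 := by
        cases rest with
        | nil => simp
        | cons c t => simp [braceStepA]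
      simp only [skipStr, List.foldl_cons, braceStepA]
      exact hesc.trans (ih d)
  case case3 rest h =>
      intro d
      simp [skipStr, h, braceStepA]
  case case4 c rest h1 h2 ih =>
      intro d
      simp only [skipStr, List.foldl_cons, braceStepA, if_neg h1, if_neg h2]
      exact ih d

-- A's fold from the plain state counts braces of the stripped list
theorem foldA_strip : ∀ (l : List Char) (d : Int),
    (l.foldl braceStepA (d, false, false)).1 = d + braceCnt (stripChars l) := by
  intro l
  induction l using stripChars.induct
  case case1 => intro d; simp [stripChars, braceCnt]
  case case2 rest ih =>
      intro d
      simp only [stripChars, List.foldl_cons, braceStepA]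
      exact (foldA_in_string rest d).trans (ih d)
  case case3 c rest h ih =>
      intro d
      have hs : stripChars (c :: rest) = c :: stripChars rest := by
        simp [stripChars, h]
      rw [hs, List.foldl_cons]
      by_cases hob : c = '{'
      · subst hob
        rw [show braceStepA (d, false, false) '{' = (d + 1, false, false) from by
          simp [braceStepA]]
        rw [ih (d + 1)]
        simp [braceCnt]
        ring
      · by_cases hcb : c = '}'
        · subst hcb
          rw [show braceStepA (d, false, false) '}' = (d - 1, false, false) from by
            simp [braceStepA]]
          rw [ih (d - 1)]
          simp [braceCnt]
          ring
        · rw [show braceStepA (d, false, false) c = (d, false, false) from by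
            simp [braceStepA, h, hob, hcb]]
          rw [ih d]
          simp [braceCnt, hob, hcb]

-- ===== VERDICT (by name: the statement is the Claim_ definition above) =====
theorem brace_delta_py_spec : Claim_equal_brace_delta_py := by
  intro line _
  unfold Spec_brace_delta_py brace_delta_py brace_delta_py_alt
  rw [foldA_strip line.toList 0]
  simp [braceCnt, PySem.List.count_eq]
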